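-- pv_equiv track=rewrite | github.com/andreas-epp/advent-of-code | python/1-not-quite-lisp.py | parse
-- ===== SOURCE A (Python) =====
-- def parse(input):
--     """find Santa's floor
--     >>> parse("(())")[0]
--     0
--     >>> parse("()()")[0]
--     0
--
--     >>> parse("(((")[0]
--     3
--     >>> parse("(()(()(")[0]
--     3
--     >>> parse("))(((((")[0]
--     3
--
--     >>> parse("())")[0]
--     -1
--     >>> parse("))(")[0]
--     -1
--
--     >>> parse(")))")[0]
--     -3
--     >>> parse(")())())")[0]
--     -3
--
--     >>> parse(")")[1]
--     1
--     >>> parse("()())")[1]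
--     5
--     """
--
--     counter = 0
--     position = 0
--     position_basement = None
--
--     for character in input:
--         position += 1
--
--         if character == "(":
--             counter += 1
--         elif character == ")":
--             counter -= 1
--
--         if counter == -1 and not position_basement:
--             position_basement = position
--     return (counter, position_basement)
-- ===== SOURCE B (Python) =====
-- def parse(input):
--     # net floor in closed form; basement position by a separate early-exit scan
--     counter = input.count("(") - input.count(")")
--     depth = 0
--     for i, character in enumerate(input):
--         depth += (character == "(") - (character == ")")
--         if depth == -1:
--             return (counter, i + 1)
--     return (counter, None)
-- ===== Notes on version B (the rewrite author's own statement) =====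
-- stated objective: idiomatic
-- what changed: counter is computed in closed form with str.count instead of being accumulated, and the basement position comes from a separate early-exit prefix-sum scan instead of a flag checked on every iteration
import Mathlib
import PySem

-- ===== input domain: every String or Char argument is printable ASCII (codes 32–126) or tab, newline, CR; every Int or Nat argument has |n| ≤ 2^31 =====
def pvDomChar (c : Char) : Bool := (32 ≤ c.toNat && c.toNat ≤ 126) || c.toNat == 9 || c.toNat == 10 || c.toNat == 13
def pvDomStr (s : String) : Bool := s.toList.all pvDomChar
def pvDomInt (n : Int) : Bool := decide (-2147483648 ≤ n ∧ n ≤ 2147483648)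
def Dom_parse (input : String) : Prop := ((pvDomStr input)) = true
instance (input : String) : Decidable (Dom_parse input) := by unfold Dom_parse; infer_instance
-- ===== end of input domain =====

-- B computes the counter in closed form (str.count) and finds the basement position by a
-- separate early-exit scan, instead of A's single loop accumulating three state variables.

-- ===== PORT A =====
-- Python truthiness of position_basement (None or an int): falsy iff None or 0
def pvOptTruthy : Option Int → Bool
  | none => false
  | some v => v != 0

def parseLoop : List Char → Int → Int → Option Int → Int × Option Int
  | [], counter, _, pb => (counter, pb)
  | ch :: rest, counter, position, pb =>
    let position := position + 1
    let counter := if ch = '(' then counter + 1 else if ch = ')' then counter - 1 else counter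
    let pb := if counter = -1 ∧ pvOptTruthy pb = false then some position else pb
    parseLoop rest counter position pb

def parse (input : String) : Int × Option Int :=
  parseLoop input.toList 0 0 none

-- ===== PORT B =====
def basementScan : List Char → Int → Int → Option Int
  | [], _, _ => none
  | ch :: rest, depth, i =>
    let depth := depth + ((if ch = '(' then (1 : Int) else 0) - (if ch = ')' then (1 : Int) else 0))
    if depth = -1 then some (i + 1) else basementScan rest depth (i + 1)

-- input.count("(") with a one-character pattern counts occurrences of that character;
-- ported as List.count over the code points (exact for a 1-char substring: occurrences
-- of a single character cannot overlap)
def parse_alt (input : String) : Int × Option Int :=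
  ((input.toList.count '(' : Int) - (input.toList.count ')' : Int),
   basementScan input.toList 0 0)

-- ===== PRECONDITION & SPEC =====
def Spec_parse (input : String) (out : Int × Option Int) : Prop := out = parse_alt input
instance (input : String) (out : Int × Option Int) : Decidable (Spec_parse input out) := by unfold Spec_parse; infer_instance

-- ===== CLAIM (what is proved, stated in full; the proofs are below) =====
def Claim_equal_parse : Prop := ∀ (input : String), Dom_parse input → Spec_parse input (parse input)

-- ===== LEMMAS AND PROOFS =====

-- per-character bookkeeping: A's branchy counter update = closed-form count difference
lemma count_cons_arith (ch : Char) (rest : List Char) (c : Int) :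
    (if ch = '(' then c + 1 else if ch = ')' then c - 1 else c)
      + (rest.count '(' : Int) - (rest.count ')' : Int)
    = c + ((ch :: rest).count '(' : Int) - ((ch :: rest).count ')' : Int) := by
  by_cases h1 : ch = '('
  · simp [h1]; ring
  · by_cases h2 : ch = ')'
    · simp [h2]; ring
    · simp [h1, h2]

-- once position_basement is a nonzero int, A's loop never overwrites it
lemma parseLoop_stuck :
    ∀ (l : List Char) (c p q : Int), q ≠ 0 →
      parseLoop l c p (some q) = (c + (l.count '(' : Int) - (l.count ')' : Int), some q) := by
  intro l
  induction l with
  | nil => intro c p q hq; simp [parseLoop]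
  | cons ch rest ih =>
    intro c p q hq
    have hqf : (q != 0) = true := by simpa using hq
    simp only [parseLoop, pvOptTruthy, hqf, Bool.true_eq_false, and_false, if_false]
    rw [ih _ _ _ hq]
    exact congrArg₂ Prod.mk (count_cons_arith ch rest c) rfl

-- A's loop = (closed-form counter, B's basement scan)
lemma parseLoop_eq :
    ∀ (l : List Char) (c p : Int), 0 ≤ p →
      parseLoop l c p none = (c + (l.count '(' : Int) - (l.count ')' : Int), basementScan l c p) := by
  intro l
  induction l with
  | nil => intro c p _; simp [parseLoop, basementScan]
  | cons ch rest ih =>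
    intro c p hp
    have hdep : (if ch = '(' then c + 1 else if ch = ')' then c - 1 else c)
        = c + ((if ch = '(' then (1 : Int) else 0) - (if ch = ')' then (1 : Int) else 0)) := by
      by_cases h1 : ch = '(' <;> by_cases h2 : ch = ')' <;> simp [h1, h2, sub_eq_add_neg]
    simp only [parseLoop, basementScan, pvOptTruthy, and_true]
    rw [← hdep]
    by_cases hb : (if ch = '(' then c + 1 else if ch = ')' then c - 1 else c) = -1
    · rw [if_pos hb, if_pos hb, parseLoop_stuck rest _ _ _ (by omega : p + 1 ≠ 0)]
      exact congrArg₂ Prod.mk (count_cons_arith ch rest c) rfl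
    · rw [if_neg hb, if_neg hb, ih _ (p + 1) (by omega)]
      exact congrArg₂ Prod.mk (count_cons_arith ch rest c) rfl

-- ===== VERDICT (by name: the statement is the Claim_ definition above) =====
theorem parse_spec : Claim_equal_parse := by
  intro input _
  unfold Spec_parse parse parse_alt
  rw [parseLoop_eq input.toList 0 0 le_rfl]
  simp
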